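-- pv_equiv track=rewrite | github.com/hyejinny97/Coding-Test | Programmers/Lv.2/점프와순간이동.py | solution
-- ===== SOURCE A (Python) =====
-- from collections import deque
--
-- def solution(destination):
--     visited = {0:0}  # 방문한 숫자와 각 숫자에 도달하기 위한 최소 점프 수를 기록
--     q = deque([0])  # 현 위치(숫자) = 새 출발점
--     while True:
--         now = q.popleft()
--         # 점프를 최소한으로 해야하기 때문에 반드시 순간이동 먼저 고려
--         if not visited.get(now * 2):  # 순간이동
--             visited[now * 2] = visited[now]
--             q.append(now * 2)
--         if not visited.get(now + 1):  # 점프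
--             visited[now + 1] = visited[now] + 1
--             q.append(now + 1)
--
--         if visited.get(destination):
--             return visited.get(destination)
-- ===== SOURCE B (Python) =====
-- def solution(destination):
--     # Each free "teleport" doubles the position and each paid jump increments it:
--     # reading the destination in binary, the minimal jump count is its popcount.
--     count = 0
--     while destination > 0:
--         count += destination % 2
--         destination //= 2
--     return count
-- ===== Notes on version B (the rewrite author's own statement) =====
-- stated objective: faster
-- what changed: Replaces the BFS over all numbers reachable by doubling/increment moves (queue + visited dict, exploring every integer up to the destination) with a direct binary popcount loop on the destination, since the minimal jump count is the popcount.
-- outside the precondition, e.g. on solution(0): A does not finish within the time limit, B returns 0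
import Mathlib
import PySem

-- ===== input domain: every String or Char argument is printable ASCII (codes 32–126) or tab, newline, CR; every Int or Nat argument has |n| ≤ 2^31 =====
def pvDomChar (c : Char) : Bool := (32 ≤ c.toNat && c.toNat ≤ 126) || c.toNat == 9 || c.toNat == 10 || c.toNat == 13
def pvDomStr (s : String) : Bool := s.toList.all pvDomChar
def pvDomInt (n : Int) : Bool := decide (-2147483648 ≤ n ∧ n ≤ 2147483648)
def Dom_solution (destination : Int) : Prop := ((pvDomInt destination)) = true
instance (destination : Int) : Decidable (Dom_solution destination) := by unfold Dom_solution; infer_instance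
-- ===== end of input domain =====

-- B replaces A's BFS (queue + visited dict over all reachable numbers) by a binary popcount
-- loop on the destination; measured faster in a timing run.

-- ===== PORT A =====
-- one iteration body of A's `while True`: pop `now`, try teleport (now*2), then jump (now+1);
-- `not visited.get(x)` is `(v[x]?).getD 0 == 0` (true on missing key and on value 0);
-- `visited[now]` is read with `.getD 0` — the key is always present when reached.
-- The dict is a hash map and the deque is the standard two-list queue (front, rear),
-- faithful to Python's dict/deque operations (append pushes on rear, popleft takes
-- from front, refilling it from the reversed rear).
def stepA (visited : Std.HashMap Int Int) (now : Int) (rear : List Int) :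
    Std.HashMap Int Int × List Int :=
  let s1 :=
    if ((visited[now * 2]?).getD 0 == 0) then
      (visited.insert (now * 2) ((visited[now]?).getD 0), (now * 2) :: rear)
    else (visited, rear)
  if ((s1.1[now + 1]?).getD 0 == 0) then
    (s1.1.insert (now + 1) ((s1.1[now]?).getD 0 + 1), (now + 1) :: s1.2)
  else s1

-- the `while True` loop with fuel (A diverges for destination ≤ 0, excluded by Pre_);
-- the final `if visited.get(destination): return` is the `r == 0` test (continue on
-- missing key or value 0, exactly Python's falsiness).
def loopA (dest : Int) : Nat → Std.HashMap Int Int → List Int → List Int → Int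
  | 0, _, _, _ => 0
  | fuel + 1, visited, front, rear =>
    match front with
    | now :: f =>
      let p := stepA visited now rear
      let r := (p.1[dest]?).getD 0
      if r == 0 then loopA dest fuel p.1 f p.2 else r
    | [] =>
      match rear.reverse with
      | [] => 0
      | now :: f =>
        let p := stepA visited now []
        let r := (p.1[dest]?).getD 0
        if r == 0 then loopA dest fuel p.1 f p.2 else r

def solution (destination : Int) : Int :=
  loopA destination (2 ^ 70) ((∅ : Std.HashMap Int Int).insert 0 0) [0] []

-- ===== PORT B =====
-- Source B: count = 0; while destination > 0: count += destination % 2; destination //= 2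
def altLoop (d : Int) (count : Int) : Int :=
  if h : 0 < d then
    altLoop (PySem.Int.floordiv d 2) (count + PySem.Int.mod d 2)
  else count
termination_by d.toNat
decreasing_by
  have : PySem.Int.floordiv d 2 = d / 2 := PySem.Int.floordiv_eq_ediv_of_pos (by omega)
  rw [this]; omega

def solution_alt (destination : Int) : Int := altLoop destination 0

-- ===== PRECONDITION & SPEC =====
-- A's BFS never terminates for destination ≤ 0 (visited.get(destination) stays falsy),
-- so Pre_ admits exactly the inputs on which A returns.
def Pre_solution (destination : Int) : Prop := 1 ≤ destination
instance (destination : Int) : Decidable (Pre_solution destination) := by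
  unfold Pre_solution; infer_instance
def pvWitness_solution : Int := 5

def Spec_solution (destination : Int) (out : Int) : Prop := out = solution_alt destination
instance (destination : Int) (out : Int) : Decidable (Spec_solution destination out) := by
  unfold Spec_solution; infer_instance

-- ===== CLAIM (what is proved, stated in full; the proofs are below) =====
def Claim_equal_solution : Prop :=
  ∀ (destination : Int), Dom_solution destination → Pre_solution destination →
    Spec_solution destination (solution destination)

-- ===== LEMMAS AND PROOFS =====

-- proof-side abstraction: the same loop with the queue as ONE list (front ++ rear.reverse)
def stepAbs (visited : Std.HashMap Int Int) (now : Int) (q1 : List Int) :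
    Std.HashMap Int Int × List Int :=
  let s1 :=
    if ((visited[now * 2]?).getD 0 == 0) then
      (visited.insert (now * 2) ((visited[now]?).getD 0), q1 ++ [now * 2])
    else (visited, q1)
  if ((s1.1[now + 1]?).getD 0 == 0) then
    (s1.1.insert (now + 1) ((s1.1[now]?).getD 0 + 1), s1.2 ++ [now + 1])
  else s1

def loopAbs (dest : Int) : Nat → Std.HashMap Int Int → List Int → Int
  | 0, _, _ => 0
  | fuel + 1, visited, q =>
    match q with
    | [] => 0
    | now :: q1 =>
      let p := stepAbs visited now q1
      let r := (p.1[dest]?).getD 0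
      if r == 0 then loopAbs dest fuel p.1 p.2 else r

lemma hm_get_insert (m : Std.HashMap Int Int) (k v a : Int) :
    (m.insert k v)[a]? = if a = k then some v else m[a]? := by
  rw [Std.HashMap.getElem?_insert]
  by_cases h : a = k
  · simp [h]
  · simp [h, show (k == a) = false from by simp [Ne.symm h]]

lemma stepA_fst (visited : Std.HashMap Int Int) (now : Int) (r q : List Int) :
    (stepA visited now r).1 = (stepAbs visited now q).1 := by
  simp only [stepA, stepAbs]
  split_ifs <;> rfl

lemma stepA_queue (visited : Std.HashMap Int Int) (now : Int) (f r : List Int) :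
    f ++ ((stepA visited now r).2).reverse = (stepAbs visited now (f ++ r.reverse)).2 := by
  simp only [stepA, stepAbs]
  split_ifs <;> simp

lemma loopA_eq_abs (dest : Int) :
    ∀ (fuel : Nat) (v : Std.HashMap Int Int) (f r : List Int),
      loopA dest fuel v f r = loopAbs dest fuel v (f ++ r.reverse) := by
  intro fuel
  induction fuel with
  | zero => intro v f r; rfl
  | succ fuel ih =>
    intro v f r
    match f with
    | now :: f' =>
      show (let p := stepA v now r
            let rr := (p.1[dest]?).getD 0
            if rr == 0 then loopA dest fuel p.1 f' p.2 else rr) = _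
      rw [show ((now :: f') ++ r.reverse : List Int) = now :: (f' ++ r.reverse) from rfl]
      show _ = (let p := stepAbs v now (f' ++ r.reverse)
            let rr := (p.1[dest]?).getD 0
            if rr == 0 then loopAbs dest fuel p.1 p.2 else rr)
      simp only
      rw [stepA_fst v now r (f' ++ r.reverse)]
      by_cases hz : ((stepAbs v now (f' ++ r.reverse)).1[dest]?).getD 0 == 0
      · rw [if_pos hz, if_pos hz, ih, stepA_queue v now f' r]
      · rw [if_neg hz, if_neg hz]
    | [] =>
      match hr : r.reverse with
      | [] => simp only [loopA, hr, List.nil_append]; rfl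
      | now :: f' =>
        have lhs : loopA dest (fuel + 1) v [] r =
            (let p := stepA v now []
             let rr := (p.1[dest]?).getD 0
             if rr == 0 then loopA dest fuel p.1 f' p.2 else rr) := by
          simp only [loopA, hr]
        rw [lhs, List.nil_append]
        show _ = (let p := stepAbs v now f'
              let rr := (p.1[dest]?).getD 0
              if rr == 0 then loopAbs dest fuel p.1 p.2 else rr)
        simp only
        rw [stepA_fst v now [] f']
        by_cases hz : ((stepAbs v now f').1[dest]?).getD 0 == 0
        · rw [if_pos hz, if_pos hz, ih]
          have hq := stepA_queue v now f' []
          simp only [List.reverse_nil, List.append_nil] at hq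
          rw [hq]
        · rw [if_neg hz, if_neg hz]

-- popcount of a natural number
def pcN (n : Nat) : Nat :=
  if n = 0 then 0 else pcN (n / 2) + n % 2
decreasing_by omega

-- BFS depth from 0 in the graph with edges n → 2n (free … counted) and n → n+1:
-- dN n = ⌊log₂ n⌋ + popcount n, defined recursively.
def dN (n : Nat) : Nat :=
  if n = 0 then 0 else if n = 1 then 1 else dN (n / 2) + 1 + n % 2
decreasing_by omega

def pcI (n : Int) : Int := (pcN n.toNat : Int)
def dI (n : Int) : Nat := dN n.toNat

lemma pcN_zero : pcN 0 = 0 := by simp [pcN]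
lemma pcN_rec (n : Nat) (h : n ≠ 0) : pcN n = pcN (n / 2) + n % 2 := by
  conv_lhs => rw [pcN]
  simp [h]
lemma dN_zero : dN 0 = 0 := by simp [dN]
lemma dN_one : dN 1 = 1 := by rw [dN]; simp
lemma dN_rec (n : Nat) (h : 2 ≤ n) : dN n = dN (n / 2) + 1 + n % 2 := by
  conv_lhs => rw [dN]
  have h0 : n ≠ 0 := by omega
  have h1 : n ≠ 1 := by omega
  simp [h0, h1]

lemma pcN_pos (n : Nat) (h : 1 ≤ n) : 1 ≤ pcN n := by
  induction n using Nat.strong_induction_on with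
  | _ n ih =>
    rw [pcN_rec n (by omega)]
    rcases Nat.even_or_odd n with he | ho
    · have h2 : 2 ≤ n := by
        rcases he with ⟨k, hk⟩; omega
      have : 1 ≤ n / 2 := by omega
      have := ih (n / 2) (by omega) this
      omega
    · have : n % 2 = 1 := Nat.odd_iff.mp ho
      omega

lemma dN_pos (n : Nat) (h : 1 ≤ n) : 1 ≤ dN n := by
  induction n using Nat.strong_induction_on with
  | _ n ih =>
    by_cases h1 : n = 1
    · simp [h1, dN_one]
    · rw [dN_rec n (by omega)]; omega

lemma dN_ge_two (n : Nat) (h : 2 ≤ n) : 2 ≤ dN n := by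
  rw [dN_rec n h]
  have := dN_pos (n / 2) (by omega)
  omega

lemma dN_two_mul (n : Nat) (h : 1 ≤ n) : dN (2 * n) = dN n + 1 := by
  rw [dN_rec (2 * n) (by omega)]
  have h1 : 2 * n / 2 = n := by omega
  have h2 : 2 * n % 2 = 0 := by omega
  rw [h1, h2]

lemma pcN_two_mul (n : Nat) : pcN (2 * n) = pcN n := by
  by_cases h : n = 0
  · simp [h, pcN_zero]
  · rw [pcN_rec (2 * n) (by omega)]
    have h1 : 2 * n / 2 = n := by omega
    have h2 : 2 * n % 2 = 0 := by omega
    rw [h1, h2]; omega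

lemma pcN_succ_even (n : Nat) (h : n % 2 = 0) : pcN (n + 1) = pcN n + 1 := by
  by_cases h0 : n = 0
  · subst h0; rw [pcN_rec 1 (by omega)]
  · rw [pcN_rec (n + 1) (by omega), pcN_rec n h0]
    have h1 : (n + 1) / 2 = n / 2 := by omega
    have h2 : (n + 1) % 2 = 1 := by omega
    rw [h1, h2]; omega

lemma dN_succ_le (n : Nat) (h : 1 ≤ n) : dN (n + 1) ≤ dN n + 1 := by
  induction n using Nat.strong_induction_on with
  | _ n ih =>
    by_cases h1 : n = 1
    · subst h1; rw [dN_rec 2 (by omega)]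
    · have h2 : 2 ≤ n := by omega
      rcases Nat.even_or_odd n with he | ho
      · -- n even ≥ 2 : dN (n+1) = dN (n/2) + 2 = dN n + 1
        have hm : n % 2 = 0 := Nat.even_iff.mp he
        rw [dN_rec (n + 1) (by omega), dN_rec n h2]
        have e1 : (n + 1) / 2 = n / 2 := by omega
        have e2 : (n + 1) % 2 = 1 := by omega
        rw [e1, e2]; omega
      · -- n odd ≥ 3 : n = 2j+1, dN (n+1) = dN (j+1) + 1 ≤ dN j + 2 = dN n
        have hm : n % 2 = 1 := Nat.odd_iff.mp ho
        have h3 : 3 ≤ n := by omega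
        have hj1 : 1 ≤ n / 2 := by omega
        rw [dN_rec (n + 1) (by omega), dN_rec n (by omega)]
        have e1 : (n + 1) / 2 = n / 2 + 1 := by omega
        have e2 : (n + 1) % 2 = 0 := by omega
        rw [e1, e2, hm]
        have := ih (n / 2) (by omega) hj1
        omega

lemma dN_succ_odd_le (n : Nat) (h : n % 2 = 1) (h3 : 3 ≤ n) : dN (n + 1) ≤ dN n := by
  have hj1 : 1 ≤ n / 2 := by omega
  rw [dN_rec (n + 1) (by omega), dN_rec n (by omega)]
  have e1 : (n + 1) / 2 = n / 2 + 1 := by omega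
  have e2 : (n + 1) % 2 = 0 := by omega
  rw [e1, e2, h]
  have := dN_succ_le (n / 2) hj1
  omega

lemma pcN_succ_of_depth (n : Nat) (h2 : 2 ≤ n) (hd : dN (n + 1) = dN n + 1) :
    pcN (n + 1) = pcN n + 1 := by
  rcases Nat.even_or_odd n with he | ho
  · exact pcN_succ_even n (Nat.even_iff.mp he)
  · exfalso
    have hm : n % 2 = 1 := Nat.odd_iff.mp ho
    have := dN_succ_odd_le n hm (by omega)
    omega

lemma dN_parent (m : Nat) (h2 : 2 ≤ m) (d : Nat) (hd : dN m = d + 1) :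
    ∃ x : Nat, 1 ≤ x ∧ dN x = d ∧ (2 * x = m ∨ x + 1 = m) := by
  rcases Nat.even_or_odd m with he | ho
  · have hm : m % 2 = 0 := Nat.even_iff.mp he
    refine ⟨m / 2, by omega, ?_, Or.inl (by omega)⟩
    rw [dN_rec m h2] at hd
    omega
  · have hm : m % 2 = 1 := Nat.odd_iff.mp ho
    have h3 : 3 ≤ m := by omega
    refine ⟨m - 1, by omega, ?_, Or.inr (by omega)⟩
    have hml : dN (m - 1) = dN (m / 2) + 1 := by
      have hmm : m - 1 = 2 * (m / 2) := by omega
      rw [hmm, dN_two_mul (m / 2) (by omega)]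
    rw [dN_rec m (by omega), hm] at hd
    omega

lemma lt_two_pow_dN (n : Nat) : n < 2 ^ dN n := by
  induction n using Nat.strong_induction_on with
  | _ n ih =>
    by_cases h0 : n = 0
    · simp [h0, dN_zero]
    by_cases h1 : n = 1
    · simp [h1, dN_one]
    have h2 : 2 ≤ n := by omega
    rw [dN_rec n h2]
    have := ih (n / 2) (by omega)
    have hpow : 2 ^ (dN (n / 2) + 1) ≤ 2 ^ (dN (n / 2) + 1 + n % 2) :=
      Nat.pow_le_pow_right (by omega) (by omega)
    have : n < 2 ^ (dN (n / 2) + 1) := by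
      have : 2 ^ (dN (n / 2) + 1) = 2 * 2 ^ dN (n / 2) := by ring
      omega
    omega

lemma dN_le_of_lt_two_pow (k : Nat) : ∀ n, n < 2 ^ k → dN n ≤ 2 * k := by
  induction k with
  | zero => intro n hn; interval_cases n; simp [dN_zero]
  | succ k ih =>
    intro n hn
    by_cases h0 : n = 0
    · simp [h0, dN_zero]
    by_cases h1 : n = 1
    · subst h1; simp [dN_one]; omega
    have h2 : 2 ≤ n := by omega
    rw [dN_rec n h2]
    have hh : n / 2 < 2 ^ k := by
      have : 2 ^ (k + 1) = 2 * 2 ^ k := by ring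
      omega
    have := ih (n / 2) hh
    omega

-- the loop invariant: the queue is (rest of layer d) ++ [separator 0] ++ (part of layer d+1);
-- visited holds exactly the numbers of depth ≤ d plus B, each with value = its popcount.
def VOK (d : Nat) (v : Std.HashMap Int Int) (B : List Int) : Prop :=
  ∀ n : Int, v[n]? =
    if (0 ≤ n ∧ dI n ≤ d) ∨ n ∈ B then some (pcI n) else none

structure BfsInv (d : Nat) (v : Std.HashMap Int Int) (A B : List Int) : Prop where
  hd : 1 ≤ d
  hA : ∀ a ∈ A, 1 ≤ a ∧ dI a = d
  hB : ∀ b ∈ B, 1 ≤ b ∧ dI b = d + 1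
  hBnd : B.Nodup
  hV : VOK d v B
  hC : ∀ m : Int, 1 ≤ m → dI m = d + 1 →
        (∃ x : Int, 1 ≤ x ∧ dI x = d ∧ (2 * x = m ∨ x + 1 = m) ∧ x ∉ A) → m ∈ B

-- Int-side bridges
lemma dI_two_mul (a : Int) (h : 1 ≤ a) : dI (2 * a) = dI a + 1 := by
  unfold dI
  have e : (2 * a).toNat = 2 * a.toNat := by omega
  rw [e, dN_two_mul a.toNat (by omega)]
lemma pcI_two_mul (a : Int) (h : 1 ≤ a) : pcI (2 * a) = pcI a := by
  unfold pcI
  have e : (2 * a).toNat = 2 * a.toNat := by omega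
  rw [e, pcN_two_mul a.toNat]
lemma pcI_pos (n : Int) (h : 1 ≤ n) : 1 ≤ pcI n := by
  unfold pcI
  have := pcN_pos n.toNat (by omega)
  omega
lemma pcI_zero : pcI 0 = 0 := by simp [pcI, pcN_zero]
lemma dI_zero : dI 0 = 0 := by simp [dI, dN_zero]
lemma dI_one : dI 1 = 1 := by simp [dI, dN_one]
lemma pcI_one : pcI 1 = 1 := by
  unfold pcI
  rw [show (1:Int).toNat = 1 from rfl, pcN_rec 1 (by omega), pcN_zero]
  simp
lemma dI_succ_le (a : Int) (h : 1 ≤ a) : dI (a + 1) ≤ dI a + 1 := by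
  unfold dI
  have e : (a + 1).toNat = a.toNat + 1 := by omega
  rw [e]
  exact dN_succ_le a.toNat (by omega)
lemma pcI_succ_of_depth (a : Int) (h2 : 2 ≤ a) (hd : dI (a + 1) = dI a + 1) :
    pcI (a + 1) = pcI a + 1 := by
  unfold dI at hd
  unfold pcI
  have e : (a + 1).toNat = a.toNat + 1 := by omega
  rw [e] at hd ⊢
  rw [pcN_succ_of_depth a.toNat (by omega) hd]
  push_cast
  ring

lemma VOK_mem {d v B} (hv : VOK d v B) {n : Int}
    (h : (0 ≤ n ∧ dI n ≤ d) ∨ n ∈ B) : v[n]? = some (pcI n) := by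
  have := hv n; rw [if_pos h] at this; exact this
lemma VOK_not {d v B} (hv : VOK d v B) {n : Int}
    (h : ¬ ((0 ≤ n ∧ dI n ≤ d) ∨ n ∈ B)) : v[n]? = none := by
  have := hv n; rw [if_neg h] at this; exact this

lemma VOK_extend {d v B} (hv : VOK d v B) (m : Int) (hd : dI m = d + 1)
    (hm : m ∉ B) : VOK d (Std.HashMap.insert v m (pcI m)) (B ++ [m]) := by
  intro n
  rw [hm_get_insert]
  by_cases hnm : n = m
  · subst hnm
    rw [if_pos rfl, if_pos (Or.inr (by simp))]
  · rw [if_neg hnm, hv n]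
    by_cases hc : (0 ≤ n ∧ dI n ≤ d) ∨ n ∈ B
    · rw [if_pos hc, if_pos (by rcases hc with h | h; exact Or.inl h; exact Or.inr (by simp [h]))]
    · rw [if_neg hc, if_neg (by
        rintro (h | h)
        · exact hc (Or.inl h)
        · simp at h
          rcases h with h | h
          · exact hc (Or.inr h)
          · exact hnm h)]

-- a number truly in layer d+1 is not in visited's "≤ d" part
lemma not_le_layer {d : Nat} {n : Int} (h : dI n = d + 1) : ¬ (0 ≤ n ∧ dI n ≤ d) := by
  rintro ⟨_, hle⟩; omega

-- when the whole layer d has been popped (A = []), B holds ALL of layer d+1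
lemma layer_full {d : Nat} {v : Std.HashMap Int Int} {B : List Int}
    (inv : BfsInv d v [] B) : ∀ n : Int, 1 ≤ n → dI n = d + 1 → n ∈ B := by
  intro n h1 hdn
  have h2 : (2:Int) ≤ n := by
    by_contra hlt
    have he : n = 1 := by omega
    rw [he, dI_one] at hdn
    have := inv.hd
    omega
  have h2n : 2 ≤ n.toNat := by omega
  obtain ⟨x, hx1, hxd, hxp⟩ := dN_parent n.toNat h2n d hdn
  refine inv.hC n h1 hdn ⟨(x : Int), by exact_mod_cast hx1, ?_, ?_, by simp⟩
  · unfold dI; simp [hxd]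
  · rcases hxp with h | h
    · left; omega
    · right; omega

-- one non-boundary iteration: pop a layer-d node a; invariant survives
lemma step_pop {d : Nat} {v : Std.HashMap Int Int} {A B : List Int} {a : Int}
    (inv : BfsInv d v (a :: A) B) :
    ∃ B', (stepAbs v a (A ++ 0 :: B)).2 = A ++ 0 :: B' ∧
      BfsInv d (stepAbs v a (A ++ 0 :: B)).1 A B' ∧ ∀ b ∈ B, b ∈ B' := by
  obtain ⟨ha1, had⟩ := inv.hA a (by simp)
  have hmul : a * 2 = 2 * a := by ring
  have h2a1 : (1:Int) ≤ 2 * a := by omega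
  have hd2a : dI (2 * a) = d + 1 := by rw [dI_two_mul a ha1, had]
  have hpa : v[a]? = some (pcI a) :=
    VOK_mem inv.hV (Or.inl ⟨by omega, le_of_eq had⟩)
  have hpc2a : (1:Int) ≤ pcI (2 * a) := pcI_pos _ h2a1
  have hpcj : (1:Int) ≤ pcI (a + 1) := pcI_pos _ (by omega)
  -- ===== branch 1 =====
  by_cases hb2 : 2 * a ∈ B
  · -- teleport target already discovered: dict and queue unchanged by the teleport branch
    have hc1 : ((v[(a * 2)]?).getD 0 == 0) = false := by
      rw [hmul, VOK_mem inv.hV (Or.inr hb2)]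
      simp
      omega
    simp only [stepAbs, hc1, Bool.false_eq_true, if_false]
    -- ===== branch 2 =====
    by_cases hj : (0 ≤ a + 1 ∧ dI (a + 1) ≤ d) ∨ a + 1 ∈ B
    · have hc2 : ((v[(a + 1)]?).getD 0 == 0) = false := by
        rw [VOK_mem inv.hV hj]
        simp
        omega
      simp only [hc2, Bool.false_eq_true, if_false]
      refine ⟨B, rfl, ⟨inv.hd, fun x hx => inv.hA x (by simp [hx]), inv.hB, inv.hBnd,
        inv.hV, ?_⟩, fun b hb => hb⟩
      rintro m hm1 hmd ⟨x, hx1, hxd, hxp, hxA⟩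
      by_cases hxa : x = a
      · subst hxa
        rcases hxp with h | h
        · rw [← h]; exact hb2
        · rw [← h] at hmd ⊢
          rcases hj with hj | hj
          · exact absurd hj (not_le_layer hmd)
          · exact hj
      · exact inv.hC m hm1 hmd ⟨x, hx1, hxd, hxp, by simp [hxa, hxA]⟩
    · -- jump target is new: it must sit in layer d+1 and get the right value
      have hc2 : ((v[(a + 1)]?).getD 0 == 0) = true := by
        rw [VOK_not inv.hV hj]; simp
      have hjd : dI (a + 1) = d + 1 := by
        have hle := dI_succ_le a ha1
        have : ¬ (0 ≤ a + 1 ∧ dI (a + 1) ≤ d) := fun h => hj (Or.inl h)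
        rw [had] at hle
        omega
      have ha2 : (2:Int) ≤ a := by
        by_contra hlt
        have he : a = 1 := by omega
        subst he
        exact hj (Or.inr (by norm_num at hb2 ⊢; exact hb2))
      have hne : a + 1 ≠ 2 * a := by omega
      have hval : pcI (a + 1) = pcI a + 1 := pcI_succ_of_depth a ha2 (by rw [hjd, had])
      simp only [hc2, if_true, hpa]
      refine ⟨B ++ [a + 1], by simp, ⟨inv.hd, fun x hx => inv.hA x (by simp [hx]), ?_, ?_, ?_, ?_⟩,
        fun b hb => by simp [hb]⟩
      · intro b hb
        rcases List.mem_append.mp hb with h | h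
        · exact inv.hB b h
        · simp at h; subst h; exact ⟨by omega, hjd⟩
      · refine List.Nodup.append inv.hBnd (by simp) ?_
        intro x hx hy
        simp at hy
        subst hy
        exact hj (Or.inr hx)
      · have hvok := VOK_extend inv.hV (a + 1) hjd (fun h => hj (Or.inr h))
        rw [hval] at hvok
        simpa using hvok
      · rintro m hm1 hmd ⟨x, hx1, hxd, hxp, hxA⟩
        by_cases hxa : x = a
        · subst hxa
          rcases hxp with h | h
          · rw [← h]; simp [hb2]
          · rw [← h]; simp
        · have := inv.hC m hm1 hmd ⟨x, hx1, hxd, hxp, by simp [hxa, hxA]⟩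
          simp [this]
  · -- teleport target is new: insert 2a with value pc a = pc 2a, append it
    have hc1 : ((v[(a * 2)]?).getD 0 == 0) = true := by
      rw [hmul, VOK_not inv.hV (by
        rintro (h | h)
        · exact (not_le_layer hd2a) h
        · exact hb2 h)]
      simp
    have hv1 : VOK d (Std.HashMap.insert v (a * 2) ((v[a]?).getD 0)) (B ++ [2 * a]) := by
      rw [hpa, hmul]
      have : pcI (2 * a) = pcI a := pcI_two_mul a ha1
      rw [show (Option.some (pcI a)).getD 0 = pcI (2 * a) from by simp [this]]
      exact VOK_extend inv.hV (2 * a) hd2a hb2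
    have hB1 : ∀ b ∈ B ++ [2 * a], 1 ≤ b ∧ dI b = d + 1 := by
      intro b hb
      rcases List.mem_append.mp hb with h | h
      · exact inv.hB b h
      · simp at h; subst h; exact ⟨h2a1, hd2a⟩
    have hB1nd : (B ++ [2 * a]).Nodup := by
      refine List.Nodup.append inv.hBnd (by simp) ?_
      intro x hx hy
      simp at hy
      subst hy
      exact hb2 hx
    simp only [stepAbs, hc1, if_true]
    -- ===== branch 2 =====
    by_cases hj : (0 ≤ a + 1 ∧ dI (a + 1) ≤ d) ∨ a + 1 ∈ B ++ [2 * a]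
    · have hc2 : (((Std.HashMap.insert v (a * 2) ((v[a]?).getD 0))[(a + 1)]?).getD 0 == 0) = false := by
        rw [VOK_mem hv1 hj]
        simp
        omega
      simp only [hc2, Bool.false_eq_true, if_false]
      refine ⟨B ++ [2 * a], by simp [hmul], ⟨inv.hd, fun x hx => inv.hA x (by simp [hx]), hB1, hB1nd,
        hv1, ?_⟩, fun b hb => by simp [hb]⟩
      rintro m hm1 hmd ⟨x, hx1, hxd, hxp, hxA⟩
      by_cases hxa : x = a
      · subst hxa
        rcases hxp with h | h
        · rw [← h]; simp
        · rw [← h] at hmd ⊢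
          rcases hj with hjc | hjc
          · exact absurd hjc (not_le_layer hmd)
          · exact hjc
      · have := inv.hC m hm1 hmd ⟨x, hx1, hxd, hxp, by simp [hxa, hxA]⟩
        simp [this]
    · have hc2 : (((Std.HashMap.insert v (a * 2) ((v[a]?).getD 0))[(a + 1)]?).getD 0 == 0) = true := by
        rw [VOK_not hv1 hj]; simp
      have hjd : dI (a + 1) = d + 1 := by
        have hle := dI_succ_le a ha1
        have : ¬ (0 ≤ a + 1 ∧ dI (a + 1) ≤ d) := fun h => hj (Or.inl h)
        rw [had] at hle
        omega
      have ha2 : (2:Int) ≤ a := by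
        by_contra hlt
        have he : a = 1 := by omega
        subst he
        exact hj (Or.inr (by simp))
      have hne2a : a + 1 ≠ a * 2 := by omega
      have hget1 : (Std.HashMap.insert v (a * 2) ((v[a]?).getD 0))[a]? = some (pcI a) := by
        rw [hm_get_insert, if_neg (by omega), hpa]
      have hval : pcI (a + 1) = pcI a + 1 := pcI_succ_of_depth a ha2 (by rw [hjd, had])
      simp only [hc2, if_true, hget1]
      have hv2 : VOK d (Std.HashMap.insert (Std.HashMap.insert v (a * 2) ((v[a]?).getD 0)) (a + 1) ((some (pcI a)).getD 0 + 1)) ((B ++ [2 * a]) ++ [a + 1]) := by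
        rw [show ((some (pcI a)).getD 0 + 1) = pcI (a + 1) from by simp [hval]]
        exact VOK_extend hv1 (a + 1) hjd (fun h => hj (Or.inr h))
      refine ⟨(B ++ [2 * a]) ++ [a + 1], by simp [hmul], ⟨inv.hd, fun x hx => inv.hA x (by simp [hx]), ?_, ?_, by simpa using hv2, ?_⟩,
        fun b hb => by simp [hb]⟩
      · intro b hb
        rcases List.mem_append.mp hb with h | h
        · exact hB1 b h
        · simp at h; subst h; exact ⟨by omega, hjd⟩
      · refine List.Nodup.append hB1nd (by simp) ?_
        intro x hx hy
        simp at hy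
        subst hy
        exact hj (Or.inr hx)
      · rintro m hm1 hmd ⟨x, hx1, hxd, hxp, hxA⟩
        by_cases hxa : x = a
        · subst hxa
          rcases hxp with h | h
          · rw [← h]; simp
          · rw [← h]; simp
        · have := inv.hC m hm1 hmd ⟨x, hx1, hxd, hxp, by simp [hxa, hxA]⟩
          simp at this ⊢
          tauto

-- boundary iteration: pop the separator 0; layer advances from d to d+1
lemma step_boundary {d : Nat} {v : Std.HashMap Int Int} {B : List Int}
    (inv : BfsInv d v [] B) :
    (stepAbs v 0 B).2 = B ++ 0 :: [] ∧ BfsInv (d + 1) (stepAbs v 0 B).1 B [] := by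
  have hg0 : v[(0:Int)]? = some 0 := by
    have := VOK_mem inv.hV (n := 0) (Or.inl ⟨le_refl 0, by rw [dI_zero]; omega⟩)
    rwa [pcI_zero] at this
  have hg1 : v[(1:Int)]? = some 1 := by
    have := VOK_mem inv.hV (n := 1) (Or.inl ⟨by omega, by rw [dI_one]; exact inv.hd⟩)
    rwa [pcI_one] at this
  have hc1 : ((v[((0:Int) * 2)]?).getD 0 == 0) = true := by
    rw [show ((0:Int) * 2) = 0 from by ring, hg0]; simp
  have hget01 : (Std.HashMap.insert v 0 ((v[(0:Int)]?).getD 0))[((0:Int) + 1)]? = some 1 := by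
    rw [hm_get_insert, if_neg (by omega)]
    exact hg1
  have hc2 : (((Std.HashMap.insert v ((0:Int) * 2) ((v[(0:Int)]?).getD 0))[((0:Int) + 1)]?).getD 0 == 0) = false := by
    rw [show ((0:Int) * 2) = 0 from by ring]
    rw [show ((0:Int) + 1) = 0 + 1 from rfl, hget01]
    simp
  have hv1 : VOK (d + 1) (Std.HashMap.insert v ((0:Int) * 2) ((v[(0:Int)]?).getD 0)) [] := by
    intro n
    rw [show ((0:Int) * 2) = 0 from by ring, hg0]
    rw [hm_get_insert]
    by_cases hn0 : n = 0
    · subst hn0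
      rw [if_pos rfl, if_pos (Or.inl ⟨le_refl 0, by rw [dI_zero]; omega⟩), pcI_zero]
      rfl
    · rw [if_neg hn0, inv.hV n]
      by_cases hc : (0 ≤ n ∧ dI n ≤ d) ∨ n ∈ B
      · rw [if_pos hc, if_pos (by
          rcases hc with ⟨h1, h2⟩ | h
          · exact Or.inl ⟨h1, by omega⟩
          · exact Or.inl ⟨by have := (inv.hB n h).1; omega, le_of_eq (inv.hB n h).2⟩)]
      · rw [if_neg hc, if_neg (by
          rintro (⟨h1, h2⟩ | h)
          · by_cases hd' : dI n ≤ d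
            · exact hc (Or.inl ⟨h1, hd'⟩)
            · have hdn : dI n = d + 1 := by omega
              have hn1 : (1:Int) ≤ n := by
                rcases lt_or_ge n 1 with hl | hge
                · exfalso
                  have : n = 0 := by omega
                  exact hn0 this
                · exact hge
              exact hc (Or.inr (layer_full inv n hn1 hdn))
          · simp at h)]
  constructor
  · simp only [stepAbs, hc1, if_true, hc2, Bool.false_eq_true, if_false]
    norm_num
  · simp only [stepAbs, hc1, if_true, hc2, Bool.false_eq_true, if_false]
    refine ⟨by omega, fun b hb => ⟨(inv.hB b hb).1, (inv.hB b hb).2⟩, by simp, by simp, hv1, ?_⟩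
    rintro m hm1 hmd ⟨x, hx1, hxd, hxp, hxB⟩
    exact absurd (layer_full inv x hx1 hxd) hxB

-- fuel needed to run layers d+1 … d+k
def Rest (d : Nat) : Nat → Nat
  | 0 => 0
  | k + 1 => 2 ^ (d + 1) + 1 + Rest (d + 1) k

lemma Rest_le (d k : Nat) : Rest d k + 2 ^ (d + 1) ≤ k + 2 ^ (d + k + 1) := by
  induction k generalizing d with
  | zero => simp [Rest]
  | succ k ih =>
    rw [Rest]
    have h1 := ih (d + 1)
    have h4 : d + 1 + k + 1 = d + (k + 1) + 1 := by omega
    rw [h4] at h1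
    have h3 : (2:Nat) ^ (d + 1 + 1) = 2 * 2 ^ (d + 1) := by ring
    omega

lemma B_len {d : Nat} {B : List Int} (hnd : B.Nodup) (hB : ∀ b ∈ B, 1 ≤ b ∧ dI b = d) :
    B.length ≤ 2 ^ d := by
  classical
  have hmn : (B.map Int.toNat).Nodup := by
    refine List.Nodup.map_on ?_ hnd
    intro x hx y hy hxy
    have := (hB x hx).1
    have := (hB y hy).1
    omega
  have hsub : (B.map Int.toNat).toFinset ⊆ Finset.range (2 ^ d) := by
    intro t ht
    rw [List.mem_toFinset, List.mem_map] at ht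
    obtain ⟨b, hb, rfl⟩ := ht
    obtain ⟨hb1, hbd⟩ := hB b hb
    have hlt := lt_two_pow_dN b.toNat
    rw [Finset.mem_range]
    unfold dI at hbd
    rw [hbd] at hlt
    exact hlt
  calc B.length = (B.map Int.toNat).length := by simp
    _ = (B.map Int.toNat).toFinset.card := (List.toFinset_card_of_nodup hmn).symm
    _ ≤ (Finset.range (2 ^ d)).card := Finset.card_le_card hsub
    _ = 2 ^ d := Finset.card_range _

lemma loopAbs_cons (dest : Int) (fuel : Nat) (v : Std.HashMap Int Int) (now : Int) (q1 : List Int) :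
    loopAbs dest (fuel + 1) v (now :: q1) =
      (if (((stepAbs v now q1).1[dest]?).getD 0 == 0)
        then loopAbs dest fuel (stepAbs v now q1).1 (stepAbs v now q1).2
        else ((stepAbs v now q1).1[dest]?).getD 0) := rfl

lemma loopAbs_cons' (dest : Int) (fuel : Nat) (v v' : Std.HashMap Int Int) (now : Int)
    (q1 q' : List Int) (h : stepAbs v now q1 = (v', q')) :
    loopAbs dest (fuel + 1) v (now :: q1) =
      (if ((v'[dest]?).getD 0 == 0)
        then loopAbs dest fuel v' q' else (v'[dest]?).getD 0) := by
  rw [loopAbs_cons, h]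

lemma loop_run (dest : Int) (hdest : 1 ≤ dest) :
    ∀ (fuel : Nat) (k d : Nat) (v : Std.HashMap Int Int) (A B : List Int),
      BfsInv d v A B → dI dest ≤ d + k → A.length + 1 + Rest d k ≤ fuel →
      loopAbs dest fuel v (A ++ 0 :: B) = pcI dest := by
  intro fuel
  induction fuel using Nat.strong_induction_on with
  | _ fuel ih =>
    intro k d v A B inv hk hfuel
    obtain ⟨f, rfl⟩ : ∃ f, fuel = f + 1 := ⟨fuel - 1, by omega⟩
    have hpos : (1:Int) ≤ pcI dest := pcI_pos dest hdest
    match A, hfuel with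
    | [], hfuel =>
      rw [show ([] ++ 0 :: B : List Int) = 0 :: B from rfl, loopAbs_cons]
      obtain ⟨hq, inv'⟩ := step_boundary inv
      by_cases hmem : (0 ≤ dest ∧ dI dest ≤ d + 1) ∨ dest ∈ ([] : List Int)
      · rw [VOK_mem inv'.hV hmem]
        have hne : ((some (pcI dest)).getD 0 == 0) = false := by simp; omega
        rw [hne]
        simp
      · rw [VOK_not inv'.hV hmem]
        have he : ((Option.none (α := Int)).getD 0 == 0) = true := by simp
        rw [he, if_pos rfl, hq]
        have hgt : d + 1 < dI dest := by
          rcases Nat.lt_or_ge (d + 1) (dI dest) with h | h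
          · exact h
          · exact absurd (Or.inl ⟨by omega, h⟩) hmem
        have hk2 : 2 ≤ k := by omega
        obtain ⟨k', rfl⟩ : ∃ k', k = k' + 1 := ⟨k - 1, by omega⟩
        have hblen : B.length ≤ 2 ^ (d + 1) := B_len inv.hBnd inv.hB
        refine ih f (by omega) k' (d + 1) _ B [] inv' (by omega) ?_
        rw [Rest] at hfuel
        omega
    | a :: A', hfuel =>
      rw [show ((a :: A') ++ 0 :: B : List Int) = a :: (A' ++ 0 :: B) from rfl, loopAbs_cons]
      obtain ⟨B', hq, inv', hsub⟩ := step_pop inv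
      by_cases hmem : (0 ≤ dest ∧ dI dest ≤ d) ∨ dest ∈ B'
      · rw [VOK_mem inv'.hV hmem]
        have hne : ((some (pcI dest)).getD 0 == 0) = false := by simp; omega
        rw [hne]
        simp
      · rw [VOK_not inv'.hV hmem]
        have he : ((Option.none (α := Int)).getD 0 == 0) = true := by simp
        rw [he, if_pos rfl, hq]
        refine ih f (by omega) k d _ A' B' inv' hk ?_
        simp at hfuel ⊢
        omega

lemma dN_le_one (t : Nat) (h : dN t ≤ 1) : t ≤ 1 := by
  by_contra hlt
  have := dN_ge_two t (by omega)
  omega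

lemma dN_eq_one (t : Nat) (h : dN t = 1) : t = 1 := by
  have h1 := dN_le_one t (by omega)
  interval_cases t
  · rw [dN_zero] at h; omega
  · rfl

-- A computes the popcount: unroll the first two iterations (both pop the origin,
-- discovering the first layer), establish the invariant, then run the main lemma.
lemma solution_eq_pcI (dest : Int) (h1 : 1 ≤ dest) (hD : dI dest ≤ 64) :
    solution dest = pcI dest := by
  unfold solution
  rw [loopA_eq_abs]
  simp only [List.reverse_nil, List.append_nil]
  have hf : (2:Nat) ^ 70 = ((2 ^ 70 - 2) + 1) + 1 := by norm_num
  rw [hf]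
  -- the start dict {0:0}
  have hd0 : ∀ n : Int, (Std.HashMap.insert (∅ : Std.HashMap Int Int) 0 0)[n]? =
      if n = 0 then some 0 else none := by
    intro n
    rw [hm_get_insert, Std.HashMap.getElem?_empty]
  -- iteration 1: pop 0, visit 0 (rewrite) and 1
  have e1 : stepAbs (Std.HashMap.insert (∅ : Std.HashMap Int Int) 0 0) 0 [] =
      (Std.HashMap.insert (Std.HashMap.insert (Std.HashMap.insert (∅ : Std.HashMap Int Int) 0 0) 0 0) 1 1, [0, 1]) := by
    simp only [stepAbs]
    rw [show ((0:Int) * 2) = 0 from by ring, show ((0:Int) + 1) = 1 from by norm_num]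
    split_ifs with h1 h2 <;> simp_all [hm_get_insert]
  rw [loopAbs_cons' _ _ _ _ _ _ _ e1]
  have hv1 : ∀ n : Int, (Std.HashMap.insert (Std.HashMap.insert (Std.HashMap.insert (∅ : Std.HashMap Int Int) 0 0) 0 0) 1 1)[n]? = if n = 1 then some 1 else if n = 0 then some 0 else none := by
    intro n
    rw [hm_get_insert, hm_get_insert, hd0]
    split_ifs <;> rfl
  by_cases hdest1 : dest = 1
  · subst hdest1
    rw [hv1 1, pcI_one]
    norm_num
  · rw [hv1 dest, if_neg hdest1, if_neg (show ¬(dest = 0) by omega)]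
    rw [show ((Option.none (α := Int)).getD 0 == 0) = true from by simp, if_pos rfl]
    -- iteration 2: pop 0 again, nothing new
    have e2 : stepAbs (Std.HashMap.insert (Std.HashMap.insert (Std.HashMap.insert (∅ : Std.HashMap Int Int) 0 0) 0 0) 1 1) 0 [1] =
        (Std.HashMap.insert (Std.HashMap.insert (Std.HashMap.insert (Std.HashMap.insert (∅ : Std.HashMap Int Int) 0 0) 0 0) 1 1) 0 0, [1, 0]) := by
      simp only [stepAbs]
      rw [show ((0:Int) * 2) = 0 from by ring]
      split_ifs with h1 h2 <;> simp_all [hm_get_insert, Std.HashMap.getElem_insert]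
    rw [loopAbs_cons' _ _ _ _ _ _ _ e2]
    have hv2 : ∀ n : Int, (Std.HashMap.insert (Std.HashMap.insert (Std.HashMap.insert (Std.HashMap.insert (∅ : Std.HashMap Int Int) 0 0) 0 0) 1 1) 0 0)[n]? = if n = 1 then some 1 else if n = 0 then some 0 else none := by
      intro n
      rw [hm_get_insert]
      by_cases hn : n = 0
      · subst hn
        rw [if_pos rfl, if_neg (by omega), if_pos rfl]
      · rw [if_neg hn, hv1 n, if_neg hn]
    rw [hv2 dest, if_neg hdest1, if_neg (show ¬(dest = 0) by omega)]
    rw [show ((Option.none (α := Int)).getD 0 == 0) = true from by simp, if_pos rfl]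
    -- now we are at the first layer, whose queue holds just its single element and the separator
    have inv1 : BfsInv 1 (Std.HashMap.insert (Std.HashMap.insert (Std.HashMap.insert (Std.HashMap.insert (∅ : Std.HashMap Int Int) 0 0) 0 0) 1 1) 0 0) [1] [] := by
      refine ⟨le_refl 1, ?_, by simp, by simp, ?_, ?_⟩
      · intro x hx
        simp at hx
        subst hx
        exact ⟨le_refl 1, dI_one⟩
      · intro n
        rw [hv2 n]
        by_cases hn1 : n = 1
        · subst hn1
          rw [if_pos rfl, if_pos (Or.inl ⟨by omega, by rw [dI_one]⟩), pcI_one]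
        · rw [if_neg hn1]
          by_cases hn0 : n = 0
          · subst hn0
            rw [if_pos rfl, if_pos (Or.inl ⟨le_refl 0, by rw [dI_zero]; omega⟩), pcI_zero]
          · rw [if_neg hn0, if_neg ?_]
            rintro (⟨hge, hle⟩ | hmem)
            · unfold dI at hle
              have h' := dN_le_one n.toNat hle
              omega
            · simp at hmem
      · rintro m hm1 hmd ⟨x, hx1, hxd, hxp, hxA⟩
        exfalso
        apply hxA
        have : x.toNat = 1 := dN_eq_one x.toNat hxd
        simp
        omega
    refine loop_run dest h1 (2 ^ 70 - 2) 63 1 _ [1] [] inv1 (by omega) ?_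
    have := Rest_le 1 63
    have h65 : (1:Nat) + 63 + 1 = 65 := by norm_num
    rw [h65] at this
    have : Rest 1 63 ≤ 63 + 2 ^ 65 := by omega
    simp
    have hbig : (63:Nat) + 2 ^ 65 + 3 ≤ 2 ^ 70 := by norm_num
    omega

-- B computes the popcount
lemma altLoop_eq (n : Nat) : ∀ d : Int, d.toNat = n → 0 ≤ d → ∀ c : Int, altLoop d c = c + pcI d := by
  induction n using Nat.strong_induction_on with
  | _ n ih =>
    intro d hn h0 c
    rw [altLoop]
    by_cases hd : 0 < d
    · simp only [hd, dif_pos]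
      have hfd : PySem.Int.floordiv d 2 = d / 2 := PySem.Int.floordiv_eq_ediv_of_pos (by omega)
      have hmd : PySem.Int.mod d 2 = d % 2 := PySem.Int.mod_eq_emod_of_pos (by omega)
      rw [hfd, hmd, ih (d / 2).toNat (by omega) (d / 2) rfl (by omega)]
      unfold pcI
      rw [pcN_rec d.toNat (by omega)]
      have e1 : (d / 2).toNat = d.toNat / 2 := by omega
      have e2 : d % 2 = ((d.toNat % 2 : Nat) : Int) := by omega
      rw [e1, e2]
      push_cast
      ring
    · simp only [hd, dif_neg, not_false_iff]
      have : d = 0 := by omega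
      simp [this, pcI_zero]

lemma solution_alt_eq_pcI (dest : Int) (h0 : 0 ≤ dest) : solution_alt dest = pcI dest := by
  unfold solution_alt
  rw [altLoop_eq dest.toNat dest rfl h0 0]
  ring

-- ===== VERDICT (by name: the statement is the Claim_ definition above) =====
theorem solution_spec : Claim_equal_solution := by
  intro dest hdom hpre
  unfold Spec_solution
  have h1 : (1:Int) ≤ dest := hpre
  have hle : dest ≤ 2147483648 := by
    have h := of_decide_eq_true hdom
    exact h.2
  have hD : dI dest ≤ 64 := by
    have hlt : dest.toNat < 2 ^ 32 := by norm_num; omega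
    have := dN_le_of_lt_two_pow 32 dest.toNat hlt
    unfold dI
    omega
  rw [solution_eq_pcI dest h1 hD, solution_alt_eq_pcI dest (by omega)]
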